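-- pv_equiv track=rewrite | github.com/vaishnevikhatri/sudoku-solver | application.py | renderPuzzle
-- ===== SOURCE A (Python) =====
-- def renderPuzzle(rawPuzzle):
--     outputString = ""
--     for i in range(len(rawPuzzle)):
--         if i > 0 and i % 3 == 0:
--             outputString += "-" * 11
--             outputString += "<br>"
--         for j in range(len(rawPuzzle[i])):
--             if j > 0 and j % 3 == 0:
--                 outputString += "|"
--             outputString += str(rawPuzzle[i][j]) if (rawPuzzle[i][j] != 0) else "x"
--         outputString += "<br>"
--     return outputString
-- ===== SOURCE B (Python) =====
-- def renderPuzzle(rawPuzzle):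
--     def rowStr(cells):
--         cs = ["x" if v == 0 else str(v) for v in cells]
--         return "|".join("".join(cs[k:k + 3]) for k in range(0, len(cs), 3))
--     rows = [rowStr(r) + "<br>" for r in rawPuzzle]
--     return ("-" * 11 + "<br>").join("".join(rows[k:k + 3]) for k in range(0, len(rows), 3))
-- ===== Notes on version B (the rewrite author's own statement) =====
-- stated objective: simpler
-- what changed: Replaces A's index-counting loops with per-cell modular separator guards by mapping every cell to its display string and assembling the output purely with block grouping: cells chunked in threes and joined with '|', row strings (each ending in '<br>') chunked in threes and joined with the dashed separator line.
import Mathlib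
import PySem

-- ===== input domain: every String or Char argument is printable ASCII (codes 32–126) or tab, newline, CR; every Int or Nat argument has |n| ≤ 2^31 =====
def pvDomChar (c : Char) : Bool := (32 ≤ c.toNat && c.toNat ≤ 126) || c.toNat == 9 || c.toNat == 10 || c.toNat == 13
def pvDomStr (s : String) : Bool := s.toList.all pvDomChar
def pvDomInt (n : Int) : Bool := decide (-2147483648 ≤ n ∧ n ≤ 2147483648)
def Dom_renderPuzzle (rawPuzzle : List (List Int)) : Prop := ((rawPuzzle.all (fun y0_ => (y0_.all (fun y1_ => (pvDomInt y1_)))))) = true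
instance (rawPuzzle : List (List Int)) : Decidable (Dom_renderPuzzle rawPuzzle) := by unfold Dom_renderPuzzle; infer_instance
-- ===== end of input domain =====

-- B rebuilds the grid by explicit block grouping (chunks of 3 joined with separators) instead of
-- A's cell-by-cell modular index guards; objective: simpler. Return values proved equal on all inputs.

-- ===== PORT A =====
-- inner loop: 'for j in range(len(row))', j carried explicitly, accumulator threaded as in A
def pvInnerA : List Int → Nat → String → String
  | [], _, acc => acc
  | v :: rest, j, acc =>
      let acc1 := if j > 0 ∧ j % 3 = 0 then acc ++ "|" else acc
      pvInnerA rest (j + 1) (acc1 ++ (if v ≠ 0 then PySem.Int.toStr v else "x"))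

-- outer loop: 'for i in range(len(rawPuzzle))'; "-"*11 is the literal "-----------"
def pvOuterA : List (List Int) → Nat → String → String
  | [], _, acc => acc
  | r :: rest, i, acc =>
      let acc1 := if i > 0 ∧ i % 3 = 0 then acc ++ "-----------" ++ "<br>" else acc
      pvOuterA rest (i + 1) (pvInnerA r 0 acc1 ++ "<br>")

def renderPuzzle (rawPuzzle : List (List Int)) : String := pvOuterA rawPuzzle 0 ""

-- ===== PORT B =====
def pvCellB (v : Int) : String := if v = 0 then "x" else PySem.Int.toStr v

-- 'xs[k:k+3] for k in range(0, len(xs), 3)': successive chunks of three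
def pvChunk3 {α : Type} : List α → List (List α)
  | [] => []
  | [a] => [[a]]
  | [a, b] => [[a, b]]
  | a :: b :: c :: rest => [a, b, c] :: pvChunk3 rest

def pvRowB (cells : List Int) : String :=
  PySem.Str.join "|" ((pvChunk3 (cells.map pvCellB)).map (PySem.Str.join ""))

def renderPuzzle_alt (rawPuzzle : List (List Int)) : String :=
  PySem.Str.join ("-----------" ++ "<br>")
    ((pvChunk3 (rawPuzzle.map (fun r => pvRowB r ++ "<br>"))).map (PySem.Str.join ""))

-- ===== PRECONDITION & SPEC =====
def Spec_renderPuzzle (rawPuzzle : List (List Int)) (out : String) : Prop := out = renderPuzzle_alt rawPuzzle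
instance (rawPuzzle : List (List Int)) (out : String) : Decidable (Spec_renderPuzzle rawPuzzle out) := by unfold Spec_renderPuzzle; infer_instance

-- ===== CLAIM (what is proved, stated in full; the proofs are below) =====
def Claim_equal_renderPuzzle : Prop := ∀ (rawPuzzle : List (List Int)), Dom_renderPuzzle rawPuzzle → Spec_renderPuzzle rawPuzzle (renderPuzzle rawPuzzle)

-- ===== LEMMAS AND PROOFS =====

theorem pvJoin_cons_cons (sep a b : String) (rest : List String) :
    PySem.Str.join sep (a :: b :: rest) = a ++ sep ++ PySem.Str.join sep (b :: rest) := by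
  simp [PySem.Str.join, PySem.Chars.join_cons_cons, String.append_assoc]

theorem pvJoin_singleton (sep a : String) : PySem.Str.join sep [a] = a := by
  simp [PySem.Str.join]

theorem pvJoin_nil (sep : String) : PySem.Str.join sep [] = "" := by
  simp [PySem.Str.join]

theorem pvCellAB (v : Int) : (if v ≠ 0 then PySem.Int.toStr v else "x") = pvCellB v := by
  unfold pvCellB; split_ifs <;> simp_all

theorem pvChunk3_ne_nil {α : Type} (x : α) (xs : List α) : pvChunk3 (x :: xs) ≠ [] := by
  cases xs with
  | nil => simp [pvChunk3]
  | cons y ys => cases ys <;> simp [pvChunk3]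

theorem pvJoin_map_chunk3_cons {α : Type} (sep : String) (f : List α → String)
    (c : List α) (rest : List α) (hr : rest ≠ []) :
    PySem.Str.join sep ((c :: pvChunk3 rest).map f) =
      f c ++ sep ++ PySem.Str.join sep ((pvChunk3 rest).map f) := by
  obtain ⟨x, xs, rfl⟩ : ∃ x xs, rest = x :: xs := by
    cases rest with
    | nil => exact absurd rfl hr
    | cons x xs => exact ⟨x, xs, rfl⟩
  obtain ⟨q, qs, hq⟩ : ∃ q qs, pvChunk3 (x :: xs) = q :: qs := by
    cases hc : pvChunk3 (x :: xs) with
    | nil => exact absurd hc (pvChunk3_ne_nil x xs)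
    | cons q qs => exact ⟨q, qs, rfl⟩
  rw [hq]; simp [pvJoin_cons_cons]

theorem pvInnerA_acc (cells : List Int) : ∀ (j : Nat) (acc : String),
    pvInnerA cells j acc = acc ++ pvInnerA cells j "" := by
  induction cells with
  | nil => intro j acc; simp [pvInnerA]
  | cons v rest ih =>
    intro j acc
    simp only [pvInnerA]
    rw [ih (j + 1), ih (j + 1) (_ ++ _)]
    split_ifs with h <;> simp [String.append_assoc]

theorem pvOuterA_acc (rows : List (List Int)) : ∀ (i : Nat) (acc : String),
    pvOuterA rows i acc = acc ++ pvOuterA rows i "" := by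
  induction rows with
  | nil => intro i acc; simp [pvOuterA]
  | cons r rest ih =>
    intro i acc
    simp only [pvOuterA]
    split_ifs with h
    · rw [ih (i + 1) (pvInnerA r 0 (acc ++ "-----------" ++ "<br>") ++ "<br>"),
          ih (i + 1) (pvInnerA r 0 ("" ++ "-----------" ++ "<br>") ++ "<br>"),
          pvInnerA_acc r 0 (acc ++ "-----------" ++ "<br>"),
          pvInnerA_acc r 0 ("" ++ "-----------" ++ "<br>")]
      simp [String.append_assoc]
    · rw [ih (i + 1) (pvInnerA r 0 acc ++ "<br>"),
          ih (i + 1) (pvInnerA r 0 "" ++ "<br>"),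
          pvInnerA_acc r 0 acc]
      simp [String.append_assoc]

-- inner loop from a positive index divisible by 3: a '|' then fresh chunks of the remaining cells
theorem pvInnerA_mul3 (cells : List Int) : ∀ (k : Nat),
    pvInnerA cells (3 * (k + 1)) "" =
      if cells = [] then "" else "|" ++ pvRowB cells := by
  induction cells using pvChunk3.induct with
  | case1 => intro k; simp [pvInnerA]
  | case2 a =>
    intro k
    have h0 : 3 * (k + 1) > 0 ∧ 3 * (k + 1) % 3 = 0 := by omega
    simp only [pvInnerA, pvCellAB, if_pos h0]
    simp [pvRowB, pvChunk3, pvJoin_singleton]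
  | case3 a b =>
    intro k
    have h0 : 3 * (k + 1) > 0 ∧ 3 * (k + 1) % 3 = 0 := by omega
    have h1 : ¬ (3 * (k + 1) + 1 > 0 ∧ (3 * (k + 1) + 1) % 3 = 0) := by omega
    simp only [pvInnerA, pvCellAB]
    rw [if_pos h0, if_neg h1]
    simp [pvRowB, pvChunk3, pvJoin_singleton, pvJoin_cons_cons, String.append_assoc]
  | case4 a b c rest ih =>
    intro k
    have h0 : 3 * (k + 1) > 0 ∧ 3 * (k + 1) % 3 = 0 := by omega
    have h1 : ¬ (3 * (k + 1) + 1 > 0 ∧ (3 * (k + 1) + 1) % 3 = 0) := by omega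
    have h2 : ¬ (3 * (k + 1) + 1 + 1 > 0 ∧ (3 * (k + 1) + 1 + 1) % 3 = 0) := by omega
    have h3 : 3 * (k + 1) + 1 + 1 + 1 = 3 * (k + 1 + 1) := by omega
    simp only [pvInnerA, pvCellAB]
    rw [if_pos h0, if_neg h1, if_neg h2, h3, pvInnerA_acc rest, ih (k + 1)]
    by_cases hr : rest = []
    · subst hr
      simp [pvRowB, pvChunk3, pvJoin_singleton, pvJoin_cons_cons, String.append_assoc]
    · have hchunk : pvChunk3 ((a :: b :: c :: rest).map pvCellB) =
          [pvCellB a, pvCellB b, pvCellB c] :: pvChunk3 (rest.map pvCellB) := by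
        simp [pvChunk3]
      have hrm : rest.map pvCellB ≠ [] := by simpa using hr
      simp only [pvRowB, hchunk,
        pvJoin_map_chunk3_cons "|" (PySem.Str.join "") _ _ hrm]
      simp [hr, pvJoin_cons_cons, pvJoin_singleton, String.append_assoc]

theorem pvInnerA_eq_rowB (cells : List Int) : pvInnerA cells 0 "" = pvRowB cells := by
  induction cells using pvChunk3.induct with
  | case1 => simp [pvInnerA, pvRowB, pvChunk3, pvJoin_nil]
  | case2 a =>
    simp only [pvInnerA, pvCellAB]
    rw [if_neg (by omega)]
    simp [pvRowB, pvChunk3, pvJoin_singleton]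
  | case3 a b =>
    simp only [pvInnerA, pvCellAB]
    rw [if_neg (by omega), if_neg (by omega)]
    simp [pvRowB, pvChunk3, pvJoin_singleton, pvJoin_cons_cons]
  | case4 a b c rest ih =>
    have h3 : (0 : Nat) + 1 + 1 + 1 = 3 * (0 + 1) := by omega
    simp only [pvInnerA, pvCellAB]
    rw [if_neg (by omega), if_neg (by omega), if_neg (by omega), h3,
        pvInnerA_acc rest, pvInnerA_mul3 rest 0]
    by_cases hr : rest = []
    · subst hr
      simp [pvRowB, pvChunk3, pvJoin_singleton, pvJoin_cons_cons, String.append_assoc]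
    · have hchunk : pvChunk3 ((a :: b :: c :: rest).map pvCellB) =
          [pvCellB a, pvCellB b, pvCellB c] :: pvChunk3 (rest.map pvCellB) := by
        simp [pvChunk3]
      have hrm : rest.map pvCellB ≠ [] := by simpa using hr
      simp only [pvRowB, hchunk,
        pvJoin_map_chunk3_cons "|" (PySem.Str.join "") _ _ hrm]
      simp [hr, pvJoin_cons_cons, pvJoin_singleton, String.append_assoc]

def pvLineB (r : List Int) : String := pvRowB r ++ "<br>"

def pvGridB (rows : List (List Int)) : String :=
  PySem.Str.join ("-----------" ++ "<br>") ((pvChunk3 (rows.map pvLineB)).map (PySem.Str.join ""))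

theorem pvOuterA_mul3 (rows : List (List Int)) : ∀ (k : Nat),
    pvOuterA rows (3 * (k + 1)) "" =
      if rows = [] then "" else ("-----------" ++ "<br>") ++ pvGridB rows := by
  induction rows using pvChunk3.induct with
  | case1 => intro k; simp [pvOuterA]
  | case2 a =>
    intro k
    have h0 : 3 * (k + 1) > 0 ∧ 3 * (k + 1) % 3 = 0 := by omega
    simp only [pvOuterA]
    rw [if_pos h0, pvInnerA_acc a, pvInnerA_eq_rowB]
    simp [pvGridB, pvChunk3, pvJoin_singleton, pvLineB, String.append_assoc]
  | case3 a b =>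
    intro k
    have h0 : 3 * (k + 1) > 0 ∧ 3 * (k + 1) % 3 = 0 := by omega
    have h1 : ¬ (3 * (k + 1) + 1 > 0 ∧ (3 * (k + 1) + 1) % 3 = 0) := by omega
    simp only [pvOuterA]
    rw [if_pos h0, if_neg h1, pvInnerA_acc a, pvInnerA_eq_rowB,
        pvInnerA_acc b, pvInnerA_eq_rowB]
    simp [pvGridB, pvChunk3, pvJoin_singleton, pvJoin_cons_cons, pvLineB,
      String.append_assoc]
  | case4 a b c rest ih =>
    intro k
    have h0 : 3 * (k + 1) > 0 ∧ 3 * (k + 1) % 3 = 0 := by omega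
    have h1 : ¬ (3 * (k + 1) + 1 > 0 ∧ (3 * (k + 1) + 1) % 3 = 0) := by omega
    have h2 : ¬ (3 * (k + 1) + 1 + 1 > 0 ∧ (3 * (k + 1) + 1 + 1) % 3 = 0) := by omega
    have h3 : 3 * (k + 1) + 1 + 1 + 1 = 3 * (k + 1 + 1) := by omega
    simp only [pvOuterA]
    rw [if_pos h0, if_neg h1, if_neg h2, h3,
        pvInnerA_acc a, pvInnerA_eq_rowB, pvInnerA_acc b, pvInnerA_eq_rowB,
        pvInnerA_acc c, pvInnerA_eq_rowB, pvOuterA_acc rest, ih (k + 1)]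
    by_cases hr : rest = []
    · subst hr
      simp [pvGridB, pvChunk3, pvJoin_singleton, pvJoin_cons_cons, pvLineB,
        String.append_assoc]
    · have hchunk : pvChunk3 ((a :: b :: c :: rest).map pvLineB) =
          [pvLineB a, pvLineB b, pvLineB c] :: pvChunk3 (rest.map pvLineB) := by
        simp [pvChunk3]
      have hrm : rest.map pvLineB ≠ [] := by simpa using hr
      simp only [pvGridB, hchunk,
        pvJoin_map_chunk3_cons _ (PySem.Str.join "") _ _ hrm]
      simp [hr, pvJoin_cons_cons, pvJoin_singleton, pvLineB, String.append_assoc]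
      rw [← String.append_assoc]
      rfl

theorem pvOuterA_eq_gridB (rows : List (List Int)) : pvOuterA rows 0 "" = pvGridB rows := by
  induction rows using pvChunk3.induct with
  | case1 => simp [pvOuterA, pvGridB, pvChunk3, pvJoin_nil]
  | case2 a =>
    simp only [pvOuterA]
    rw [if_neg (by omega), pvInnerA_acc a, pvInnerA_eq_rowB]
    simp [pvGridB, pvChunk3, pvJoin_singleton, pvLineB]
  | case3 a b =>
    simp only [pvOuterA]
    rw [if_neg (by omega), if_neg (by omega), pvInnerA_acc a, pvInnerA_eq_rowB,
        pvInnerA_acc b, pvInnerA_eq_rowB]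
    simp [pvGridB, pvChunk3, pvJoin_singleton, pvJoin_cons_cons, pvLineB,
      String.append_assoc]
  | case4 a b c rest ih =>
    have h3 : (0 : Nat) + 1 + 1 + 1 = 3 * (0 + 1) := by omega
    simp only [pvOuterA]
    rw [if_neg (by omega), if_neg (by omega), if_neg (by omega), h3,
        pvInnerA_acc a, pvInnerA_eq_rowB, pvInnerA_acc b, pvInnerA_eq_rowB,
        pvInnerA_acc c, pvInnerA_eq_rowB, pvOuterA_acc rest, pvOuterA_mul3 rest 0]
    by_cases hr : rest = []
    · subst hr
      simp [pvGridB, pvChunk3, pvJoin_singleton, pvJoin_cons_cons, pvLineB,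
        String.append_assoc]
    · have hchunk : pvChunk3 ((a :: b :: c :: rest).map pvLineB) =
          [pvLineB a, pvLineB b, pvLineB c] :: pvChunk3 (rest.map pvLineB) := by
        simp [pvChunk3]
      have hrm : rest.map pvLineB ≠ [] := by simpa using hr
      simp only [pvGridB, hchunk,
        pvJoin_map_chunk3_cons _ (PySem.Str.join "") _ _ hrm]
      simp [hr, pvJoin_cons_cons, pvJoin_singleton, pvLineB, String.append_assoc]
      rw [← String.append_assoc]
      rfl

-- ===== VERDICT (by name: the statement is the Claim_ definition above) =====
theorem renderPuzzle_spec : Claim_equal_renderPuzzle := by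
  intro rawPuzzle _
  unfold Spec_renderPuzzle renderPuzzle renderPuzzle_alt
  rw [pvOuterA_eq_gridB]
  rfl
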